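-- pv_equiv track=rewrite | github.com/ScoobySatiacum/AoC | 2025/day2/day2.py | validate_ids_part2
-- ===== SOURCE A (Python) =====
-- def validate_ids_part2(id_range):
--
--     minimum = 1
--     maximum = len(id_range[-1]) // 2
--     pattern_length_options = [i for i in range(minimum, maximum + 1)]
--
--     valid_ids = []
--
--     for len_option in pattern_length_options:
--         for item in id_range:
--
--             pattern_length = len_option
--
--             pattern = item[0:pattern_length]
--             content = item[pattern_length:len(item)]
--
--             if content:
--
--                 split_content = item.split(pattern)
--                 test = [i for i in split_content if i != '']
--                 if not test:
--                     if int(item) not in valid_ids: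
--                         valid_ids.append(int(item))
--
--     return valid_ids
-- ===== SOURCE B (Python) =====
-- def _min_rep_len(item, cap):
--     # smallest L <= cap such that item is >=2 copies of its L-prefix (checks only divisors of len)
--     n = len(item)
--     for L in range(1, min(cap, n - 1) + 1):
--         if n % L == 0 and item == item[:L] * (n // L):
--             return L
--     return None
--
--
-- def validate_ids_part2(id_range):
--     cap = len(id_range[-1]) // 2
--     buckets = [[] for _ in range(cap + 1)]
--     for item in id_range:
--         L = _min_rep_len(item, cap)
--         if L is not None:
--             buckets[L].append(int(item))
--     out = []
--     for bucket in buckets: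
--         for v in bucket:
--             if v not in out:
--                 out.append(v)
--     return out
-- ===== Notes on version B (the rewrite author's own statement) =====
-- stated objective: alternative
-- what changed: B makes one pass per item computing its minimal repetition length (testing only divisors of the length and stopping at the first hit) and buckets items by that length, instead of A's outer loop over every candidate pattern length that re-slices and re-splits every item at every length.
import Mathlib
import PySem

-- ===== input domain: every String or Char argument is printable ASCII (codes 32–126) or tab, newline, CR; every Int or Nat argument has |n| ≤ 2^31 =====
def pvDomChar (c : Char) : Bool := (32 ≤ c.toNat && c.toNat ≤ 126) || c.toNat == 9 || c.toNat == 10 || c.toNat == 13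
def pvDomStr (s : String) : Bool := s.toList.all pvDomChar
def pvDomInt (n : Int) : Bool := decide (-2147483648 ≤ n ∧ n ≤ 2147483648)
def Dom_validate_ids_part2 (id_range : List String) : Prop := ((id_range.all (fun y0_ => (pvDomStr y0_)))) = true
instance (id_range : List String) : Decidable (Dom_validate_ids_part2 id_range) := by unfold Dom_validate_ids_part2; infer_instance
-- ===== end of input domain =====

-- B replaces A's rescan of every item at every candidate pattern length by one pass per item
-- that finds the item's minimal repetition length (testing only divisors of its length) and
-- buckets the item by it (a different algorithm of comparable measured cost).

-- ===== PORT A =====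
def validate_ids_part2 (id_range : List String) : List Int :=
  let maximum := PySem.Int.floordiv (PySem.Str.len ((PySem.List.pyGet? id_range (-1)).getD "")) 2
  let pattern_length_options := PySem.List.pyRange 1 (maximum + 1)
  pattern_length_options.foldl (fun valid_ids len_option =>
    id_range.foldl (fun valid_ids item =>
      let pattern_length := len_option
      let pattern := PySem.Str.slice item (some 0) (some pattern_length)
      let content := PySem.Str.slice item (some pattern_length) (some (PySem.Str.len item))
      if content ≠ "" then
        let split_content := (PySem.Str.split? item pattern).getD []
        let test := split_content.filter (fun i => i ≠ "")
        if test = [] then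
          if (PySem.Int.ofStr? item).getD 0 ∉ valid_ids then
            valid_ids ++ [(PySem.Int.ofStr? item).getD 0]
          else valid_ids
        else valid_ids
      else valid_ids) valid_ids) []

-- ===== PORT B =====
-- helper _min_rep_len of Source B; 'item[:L] * (n // L)' is ported by hand as
-- String.ofList (pyRepeat …), exact for Python string repetition.
def minRepLen (item : String) (cap : Int) : Option Int :=
  (PySem.List.pyRange 1 (min cap (PySem.Str.len item - 1) + 1)).find? (fun L =>
    PySem.Int.mod (PySem.Str.len item) L == 0 &&
      item == String.ofList (PySem.List.pyRepeat (PySem.Str.slice item none (some L)).toList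
        (PySem.Int.floordiv (PySem.Str.len item) L)))

def validate_ids_part2_alt (id_range : List String) : List Int :=
  let cap := PySem.Int.floordiv (PySem.Str.len ((PySem.List.pyGet? id_range (-1)).getD "")) 2
  let buckets := id_range.foldl (fun buckets item =>
    match minRepLen item cap with
    | some L => buckets.set L.toNat (buckets.getD L.toNat [] ++ [(PySem.Int.ofStr? item).getD 0])
    | none => buckets) (List.replicate (cap + 1).toNat ([] : List Int))
  buckets.foldl (fun out bucket =>
    bucket.foldl (fun out v => if v ∉ out then out ++ [v] else out) out) []

-- ===== PRECONDITION & SPEC =====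
-- Pre_ excludes exactly the inputs where Python A raises: the empty list (IndexError on
-- id_range[-1]) and lists containing an item that is a ≥2-fold repetition of a prefix of
-- length ≤ cap but is not parseable by int() (ValueError).
def Pre_validate_ids_part2 (id_range : List String) : Prop :=
  id_range ≠ [] ∧ ∀ s ∈ id_range,
    (∃ L ∈ List.range s.toList.length, 1 ≤ L ∧
        (L : Int) ≤ PySem.Int.floordiv (PySem.Str.len ((PySem.List.pyGet? id_range (-1)).getD "")) 2 ∧
        s.toList = (List.replicate (s.toList.length / L) (s.toList.take L)).flatten) →
    (PySem.Int.ofStr? s).isSome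
instance (id_range : List String) : Decidable (Pre_validate_ids_part2 id_range) := by
  unfold Pre_validate_ids_part2; infer_instance

def pvWitness_validate_ids_part2 : List String := ["1212"]

def Spec_validate_ids_part2 (id_range : List String) (out : List Int) : Prop := out = validate_ids_part2_alt id_range
instance (id_range : List String) (out : List Int) : Decidable (Spec_validate_ids_part2 id_range out) := by unfold Spec_validate_ids_part2; infer_instance

-- ===== CLAIM (what is proved, stated in full; the proofs are below) =====
def Claim_equal_validate_ids_part2 : Prop := ∀ (id_range : List String), Dom_validate_ids_part2 id_range → Pre_validate_ids_part2 id_range → Spec_validate_ids_part2 id_range (validate_ids_part2 id_range)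

-- ===== LEMMAS AND PROOFS =====

-- the value appended for an item, and the dedup/append step both ports use
def valOf (s : String) : Int := (PySem.Int.ofStr? s).getD 0

def dadd (out : List Int) (v : Int) : List Int := if v ∉ out then out ++ [v] else out

-- "item is a ≥2-fold repetition of its length-L prefix" (the gate both loops test)
def repB (cs : List Char) (L : Int) : Bool :=
  decide (1 ≤ L ∧ L < (cs.length : Int) ∧
    cs = (List.replicate (cs.length / L.toNat) (cs.take L.toNat)).flatten)

-- ---- splitOn characterisation ----

lemma join_append_singleton (sep x : List Char) (ys : List (List Char)) :
    PySem.Chars.join sep (ys ++ [x]) =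
      PySem.Chars.join sep ys ++ (if ys = [] then [] else sep) ++ x := by
  induction ys with
  | nil => simp [PySem.Chars.join_singleton, PySem.Chars.join_nil]
  | cons a t ih =>
    cases t with
    | nil => simp [PySem.Chars.join_cons_cons, PySem.Chars.join_singleton]
    | cons b t' =>
      simp only [List.cons_append, PySem.Chars.join_cons_cons]
      rw [show b :: (t' ++ [x]) = (b :: t') ++ [x] by simp, ih]
      simp [List.append_assoc]

lemma join_go (sep : List Char) :
    ∀ (fuel : Nat) (l cur : List Char) (acc : List (List Char)),
      PySem.Chars.join sep (PySem.Chars.splitOn.go sep fuel l cur acc) =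
        PySem.Chars.join sep acc.reverse ++ (if acc = [] then [] else sep) ++ cur.reverse ++ l := by
  intro fuel
  induction fuel with
  | zero =>
    intro l cur acc
    simp only [PySem.Chars.splitOn.go]
    rw [show ((cur.reverse ++ l) :: acc).reverse = acc.reverse ++ [cur.reverse ++ l] by simp]
    rw [join_append_singleton]
    simp [List.append_assoc]
  | succ fuel ih =>
    intro l cur acc
    cases l with
    | nil =>
      simp only [PySem.Chars.splitOn.go]
      rw [show (cur.reverse :: acc).reverse = acc.reverse ++ [cur.reverse] by simp]
      rw [join_append_singleton]
      simp [List.append_assoc]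
    | cons c rest =>
      simp only [PySem.Chars.splitOn.go]
      by_cases hp : sep.isPrefixOf (c :: rest) = true
      · rw [if_pos hp, ih]
        have hpre : sep <+: (c :: rest) := List.isPrefixOf_iff_prefix.mp hp
        obtain ⟨t, ht⟩ := hpre
        rw [show (cur.reverse :: acc).reverse = acc.reverse ++ [cur.reverse] by simp]
        rw [join_append_singleton]
        have hdrop : List.drop sep.length (c :: rest) = t := by
          rw [← ht]; exact List.drop_left
        rw [hdrop, ← ht]
        simp [List.append_assoc]
      · rw [if_neg hp, ih]
        simp [List.append_assoc]

lemma join_splitOn (cs sep : List Char) :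
    PySem.Chars.join sep (PySem.Chars.splitOn cs sep) = cs := by
  unfold PySem.Chars.splitOn
  rw [join_go]
  simp [PySem.Chars.join_nil]

lemma go_rep (sep : List Char) (hsep : sep ≠ []) :
    ∀ (k fuel : Nat) (acc : List (List Char)), k ≤ fuel →
      PySem.Chars.splitOn.go sep fuel ((List.replicate k sep).flatten) [] acc =
        acc.reverse ++ List.replicate (k + 1) ([] : List Char) := by
  intro k
  induction k with
  | zero =>
    intro fuel acc _
    cases fuel with
    | zero => simp [PySem.Chars.splitOn.go]
    | succ f => simp [PySem.Chars.splitOn.go]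
  | succ k ih =>
    intro fuel acc hk
    cases fuel with
    | zero => omega
    | succ f =>
      obtain ⟨c, cs', hc⟩ := List.exists_cons_of_ne_nil hsep
      have hl : (List.replicate (k + 1) sep).flatten =
          c :: (cs' ++ (List.replicate k sep).flatten) := by
        rw [List.replicate_succ]; rw [List.flatten_cons]; rw [hc]; simp
      rw [hl]
      simp only [PySem.Chars.splitOn.go]
      have hpre : sep.isPrefixOf (c :: (cs' ++ (List.replicate k sep).flatten)) = true := by
        rw [List.isPrefixOf_iff_prefix]
        exact ⟨(List.replicate k sep).flatten, by rw [hc]; simp⟩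
      rw [if_pos hpre]
      have hdrop : List.drop sep.length (c :: (cs' ++ (List.replicate k sep).flatten)) =
          (List.replicate k sep).flatten := by
        have heq : c :: (cs' ++ (List.replicate k sep).flatten) =
            sep ++ (List.replicate k sep).flatten := by rw [hc]; simp
        rw [heq]; exact List.drop_left
      rw [hdrop]
      simp only [List.reverse_nil]
      rw [ih f ([] :: acc) (by omega)]
      simp [List.replicate_succ, List.append_assoc]

lemma length_flatten_replicate (k : Nat) (t : List Char) :
    ((List.replicate k t).flatten).length = k * t.length := by
  induction k with
  | zero => simp
  | succ k ih => simp [List.replicate_succ, ih, Nat.succ_mul]; omega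

lemma join_replicate_nil (sep : List Char) (k : Nat) :
    PySem.Chars.join sep (List.replicate (k + 1) ([] : List Char)) =
      (List.replicate k sep).flatten := by
  induction k with
  | zero => simp [PySem.Chars.join_singleton]
  | succ k ih =>
    have h1 : List.replicate (k + 1 + 1) ([] : List Char) = [] :: [] :: List.replicate k [] := by
      simp [List.replicate_succ]
    rw [h1, PySem.Chars.join_cons_cons]
    have h2 : ([] : List Char) :: List.replicate k ([] : List Char) =
        List.replicate (k + 1) [] := by simp [List.replicate_succ]
    rw [h2, ih]
    simp [List.replicate_succ]

lemma splitOn_allEmpty_iff (cs sep : List Char) (hs : cs ≠ []) (hsep : sep ≠ []) :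
    (PySem.Chars.splitOn cs sep).filter (fun p => p ≠ []) = [] ↔
      ∃ k, 1 ≤ k ∧ cs = (List.replicate k sep).flatten := by
  constructor
  · intro h
    have hall : ∀ p ∈ PySem.Chars.splitOn cs sep, p = [] := by
      intro p hp
      simpa using List.filter_eq_nil_iff.mp h p hp
    have hrep := List.eq_replicate_of_mem hall
    have hj := join_splitOn cs sep
    rw [hrep] at hj
    rcases hlm : (PySem.Chars.splitOn cs sep).length with _ | m'
    · rw [hlm] at hj; simp [PySem.Chars.join_nil] at hj; exact (hs hj).elim
    · rw [hlm, join_replicate_nil] at hj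
      refine ⟨m', ?_, hj.symm⟩
      rcases Nat.eq_zero_or_pos m' with h0 | h1
      · subst h0; simp at hj; exact (hs hj).elim
      · exact h1
  · rintro ⟨k, hk1, hkeq⟩
    have hsl : 1 ≤ sep.length := List.length_pos_iff.mpr hsep
    have hn : cs.length = k * sep.length := by rw [hkeq, length_flatten_replicate]
    have hgo := go_rep sep hsep k ((List.replicate k sep).flatten.length + 1) []
      (by rw [length_flatten_replicate]; nlinarith)
    have hsplit : PySem.Chars.splitOn cs sep = List.replicate (k + 1) [] := by
      unfold PySem.Chars.splitOn
      conv_lhs => rw [hkeq]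
      rw [hgo]; simp
    rw [hsplit, List.filter_eq_nil_iff]
    intro a ha
    have := List.eq_of_mem_replicate ha
    simp [this]

-- ---- A's loop body equals the repB gate ----

lemma body_eq (L : Int) (hL : 1 ≤ L) (acc : List Int) (s : String) :
    (if PySem.Str.slice s (some L) (some (PySem.Str.len s)) ≠ "" then
       if ((PySem.Str.split? s (PySem.Str.slice s (some 0) (some L))).getD []).filter
           (fun i => i ≠ "") = [] then
         if (PySem.Int.ofStr? s).getD 0 ∉ acc then acc ++ [(PySem.Int.ofStr? s).getD 0] else acc
       else acc
     else acc) =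
    if repB s.toList L then dadd acc (valOf s) else acc := by
  have hLnn : (0 : Int) ≤ L := by omega
  have hLcast : some L = some ((L.toNat : Nat) : Int) := by rw [Int.toNat_of_nonneg hLnn]
  have hpat : (PySem.Str.slice s (some 0) (some L)).toList = s.toList.take L.toNat := by
    rw [PySem.Str.toList_slice, PySem.Chars.slice_eq_listSlice, hLcast,
      show (some (0:Int)) = some ((0:Nat) : Int) by norm_num,
      PySem.List.slice_natCast]
    simp
  have hcon : (PySem.Str.slice s (some L) (some (PySem.Str.len s))).toList =
      s.toList.drop L.toNat := by
    rw [PySem.Str.toList_slice, PySem.Chars.slice_eq_listSlice, hLcast,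
      show some (PySem.Str.len s) = some ((s.toList.length : Nat) : Int) from by
        rw [PySem.Str.len_eq],
      PySem.List.slice_natCast]
    exact List.take_of_length_le (by simp)
  by_cases hLn : L < (s.toList.length : Int)
  · have hne : PySem.Str.slice s (some L) (some (PySem.Str.len s)) ≠ "" := by
      rw [ne_eq, ← String.toList_inj, hcon]
      intro hdrop
      have hd2 : s.toList.drop L.toNat = [] := by simpa using hdrop
      have := List.drop_eq_nil_iff.mp hd2
      omega
    rw [if_pos hne]
    have hcs0 : s.toList ≠ [] := by
      intro h; rw [h] at hLn; simp at hLn; omega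
    have hsepne : s.toList.take L.toNat ≠ [] := by
      intro h
      rcases List.take_eq_nil_iff.mp h with h0 | h0
      · omega
      · exact hcs0 h0
    have hsplit : (PySem.Str.split? s (PySem.Str.slice s (some 0) (some L))).getD [] =
        (PySem.Chars.splitOn s.toList (s.toList.take L.toNat)).map String.ofList := by
      unfold PySem.Str.split? PySem.Chars.split?
      rw [hpat]
      simp [hsepne]
    rw [hsplit]
    have htest : ((PySem.Chars.splitOn s.toList (s.toList.take L.toNat)).map String.ofList).filter
        (fun i => i ≠ "") = []
        ↔ (PySem.Chars.splitOn s.toList (s.toList.take L.toNat)).filter (fun p => p ≠ []) = [] := by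
      rw [List.filter_map, List.map_eq_nil_iff]
      have hpt : ∀ p : List Char, ((fun (i : String) => decide (i ≠ "")) ∘ String.ofList) p
          = decide (p ≠ []) := by
        intro p
        simp only [Function.comp_apply, decide_eq_decide]
        constructor
        · intro h hpe
          apply h
          rw [hpe, ← String.toList_inj, String.toList_ofList]
        · intro h he
          apply h
          rw [← String.toList_ofList (l := p), he]
          simp
      rw [List.filter_congr (fun p _ => hpt p)]
    by_cases hrep : s.toList =
        (List.replicate (s.toList.length / L.toNat) (s.toList.take L.toNat)).flatten
    · have hex : ∃ k, 1 ≤ k ∧ s.toList = (List.replicate k (s.toList.take L.toNat)).flatten :=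
        ⟨s.toList.length / L.toNat, (Nat.one_le_div_iff (by omega)).mpr (by omega), hrep⟩
      rw [if_pos (htest.mpr ((splitOn_allEmpty_iff s.toList _ hcs0 hsepne).mpr hex))]
      have hrb : repB s.toList L = true := by
        simp only [repB, decide_eq_true_eq]
        exact ⟨hL, hLn, hrep⟩
      rw [if_pos hrb]
      rfl
    · have hnf : ¬ ((PySem.Chars.splitOn s.toList (s.toList.take L.toNat)).filter
          (fun p => p ≠ []) = []) := by
        intro hf
        obtain ⟨k, hk1, hkeq⟩ := (splitOn_allEmpty_iff s.toList _ hcs0 hsepne).mp hf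
        apply hrep
        have hsl : (s.toList.take L.toNat).length = L.toNat := by
          rw [List.length_take]; omega
        have hlen2 : s.toList.length = k * L.toNat := by
          rw [hkeq, length_flatten_replicate, hsl]
        have hk : s.toList.length / L.toNat = k := by
          rw [hlen2]; exact Nat.mul_div_cancel k (by omega)
        rw [hk]; exact hkeq
      rw [if_neg (fun hf => hnf (htest.mp hf))]
      have hrb : repB s.toList L = false := by
        simp only [repB, decide_eq_false_iff_not]
        rintro ⟨-, -, h3⟩
        exact hrep h3
      rw [if_neg (by simp [hrb])]
  · have hconEmpty : PySem.Str.slice s (some L) (some (PySem.Str.len s)) = "" := by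
      rw [← String.toList_inj, hcon]
      rw [List.drop_eq_nil_of_le (by omega)]
      simp
    rw [if_neg (show ¬ (PySem.Str.slice s (some L) (some (PySem.Str.len s)) ≠ "") from
      fun h => h hconEmpty)]
    have hrb : repB s.toList L = false := by
      simp only [repB, decide_eq_false_iff_not]
      rintro ⟨-, h2, -⟩
      omega
    rw [if_neg (by simp [hrb])]

-- ---- pyRange facts ----

lemma pyRange_nil {a b : Int} (h : b ≤ a) : PySem.List.pyRange a b = [] := by
  unfold PySem.List.pyRange
  simp only [if_neg one_ne_zero]
  have h1 : ¬ a < b := by omega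
  simp [h1]

lemma pyRange_nodup_aux : ∀ (n : Nat) (a b : Int), (b - a).toNat ≤ n →
    (PySem.List.pyRange a b).Nodup := by
  intro n
  induction n with
  | zero =>
    intro a b h
    rw [pyRange_nil (by omega)]
    exact List.nodup_nil
  | succ n ih =>
    intro a b h
    by_cases hab : a < b
    · rw [PySem.List.pyRange_one_cons hab]
      refine List.nodup_cons.mpr ⟨?_, ih (a + 1) b (by omega)⟩
      intro hmem
      have := PySem.List.mem_pyRange_one.mp hmem
      omega
    · rw [pyRange_nil (by omega)]
      exact List.nodup_nil

lemma pyRange_nodup (a b : Int) : (PySem.List.pyRange a b).Nodup :=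
  pyRange_nodup_aux (b - a).toNat a b le_rfl

-- ---- dedup-fold (gated) helper lemmas ----

lemma mem_dadd {acc : List Int} {v x : Int} (h : x ∈ acc) : x ∈ dadd acc v := by
  unfold dadd; split <;> simp [h]

lemma mem_dadd_self (acc : List Int) (v : Int) : v ∈ dadd acc v := by
  unfold dadd; split <;> simp_all

lemma dadd_of_mem {acc : List Int} {v : Int} (h : v ∈ acc) : dadd acc v = acc := by
  unfold dadd; simp [h]

def gfold (p : String → Bool) (acc : List Int) (items : List String) : List Int :=
  items.foldl (fun a s => if p s then dadd a (valOf s) else a) acc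

lemma gfold_cons (p : String → Bool) (a : String) (t : List String) (acc : List Int) :
    gfold p acc (a :: t) = gfold p (if p a then dadd acc (valOf a) else acc) t := rfl

lemma mem_gfold {p : String → Bool} {x : Int} :
    ∀ (items : List String) {acc : List Int}, x ∈ acc → x ∈ gfold p acc items := by
  intro items
  induction items with
  | nil => intro acc h; exact h
  | cons a t ih =>
    intro acc h
    rw [gfold_cons]
    by_cases hpa : p a = true
    · rw [if_pos hpa]; exact ih (mem_dadd h)
    · rw [if_neg hpa]; exact ih h

lemma mem_gfold_self {p : String → Bool} {s : String} (hp : p s = true) :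
    ∀ (items : List String) (acc : List Int), s ∈ items → valOf s ∈ gfold p acc items := by
  intro items
  induction items with
  | nil => intro acc h; cases h
  | cons a t ih =>
    intro acc hs
    rw [gfold_cons]
    rcases List.mem_cons.mp hs with h | h
    · subst h
      rw [if_pos hp]
      exact mem_gfold t (mem_dadd_self acc (valOf s))
    · by_cases hpa : p a = true
      · rw [if_pos hpa]; exact ih _ h
      · rw [if_neg hpa]; exact ih _ h

lemma gfold_false : ∀ (items : List String) (p : String → Bool) (acc : List Int),
    (∀ s ∈ items, p s = false) → gfold p acc items = acc := by
  intro items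
  induction items with
  | nil => intro p acc _; rfl
  | cons a t ih =>
    intro p acc h
    rw [gfold_cons, if_neg (by simp [h a (by simp)])]
    exact ih p acc (fun s hs => h s (by simp [hs]))

lemma gfold_skip : ∀ (items : List String) (p q : String → Bool) (acc : List Int),
    (∀ s ∈ items, p s = true → q s = false → valOf s ∈ acc) →
    gfold p acc items = gfold (fun s => p s && q s) acc items := by
  intro items
  induction items with
  | nil => intro p q acc _; rfl
  | cons a t ih =>
    intro p q acc h
    rw [gfold_cons, gfold_cons]
    by_cases hpa : p a = true
    · by_cases hqa : q a = true
      · rw [if_pos hpa, if_pos (by simp [hpa, hqa])]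
        exact ih p q _ (fun s hs h1 h2 => mem_dadd (h s (by simp [hs]) h1 h2))
      · have hqa' : q a = false := by simpa using hqa
        rw [if_pos hpa, if_neg (by simp [hqa']), dadd_of_mem (h a (by simp) hpa hqa')]
        exact ih p q _ (fun s hs h1 h2 => h s (by simp [hs]) h1 h2)
    · rw [if_neg hpa, if_neg (by simp; intro hc; exact absurd hc hpa)]
      exact ih p q _ (fun s hs h1 h2 => h s (by simp [hs]) h1 h2)

-- ---- find? facts ----

lemma find?_congr_mem {α : Type} (l : List α) (p q : α → Bool)
    (h : ∀ x ∈ l, p x = q x) : l.find? p = l.find? q := by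
  induction l with
  | nil => rfl
  | cons a t ih =>
    simp only [List.find?_cons]
    rw [h a (by simp)]
    split
    · rfl
    · exact ih (fun x hx => h x (by simp [hx]))

lemma find?_split {pre suf' : List Int} {L : Int} (p : Int → Bool)
    (hnd : (pre ++ L :: suf').Nodup) :
    ((pre ++ L :: suf').find? p == some L) = (p L && !pre.any p) := by
  have hLpre : L ∉ pre := by
    intro hmem
    exact (List.disjoint_of_nodup_append hnd) hmem (by simp)
  have hLsuf : L ∉ suf' := by
    have h2 := (List.nodup_append.mp hnd).2.1
    exact (List.nodup_cons.mp h2).1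
  rw [List.find?_append]
  cases hfp : pre.find? p with
  | some x =>
    have hxp : x ∈ pre := List.mem_of_find?_eq_some hfp
    have hx : x ≠ L := fun h => hLpre (h ▸ hxp)
    have hany : pre.any p = true := List.any_eq_true.mpr ⟨x, hxp, List.find?_some hfp⟩
    simp [Option.or, hany, hx]
  | none =>
    have hany : pre.any p = false := by
      simp only [List.any_eq_false]
      intro x hx
      simpa using List.find?_eq_none.mp hfp x hx
    simp only [Option.or, hany, Bool.not_false, Bool.and_true]
    cases hpL : p L with
    | true => simp [hpL]
    | false =>
      simp only [List.find?_cons, hpL]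
      cases hfs : suf'.find? p with
      | some y =>
        have hy : y ≠ L := fun h => hLsuf (h ▸ List.mem_of_find?_eq_some hfs)
        simp [hy]
      | none => simp

-- ---- the reordering lemma ----

lemma main_reorder (items : List String) (R : List Int) (hnd : R.Nodup) :
    ∀ (suf pre : List Int) (acc : List Int), R = pre ++ suf →
      (∀ s ∈ items, (∃ L ∈ pre, repB s.toList L = true) → valOf s ∈ acc) →
      suf.foldl (fun acc L => gfold (fun (s : String) => repB s.toList L) acc items) acc =
        suf.foldl (fun acc L =>
          gfold (fun (s : String) => R.find? (fun L' => repB s.toList L') == some L) acc items)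
          acc := by
  intro suf
  induction suf with
  | nil => intro pre acc _ _; rfl
  | cons L suf' ih =>
    intro pre acc hR Hacc
    simp only [List.foldl_cons]
    have h1 : ∀ s : String, (R.find? (fun L' => repB s.toList L') == some L) =
        (repB s.toList L && !pre.any (fun L' => repB s.toList L')) := by
      intro s
      rw [hR]
      exact find?_split _ (hR ▸ hnd)
    have hstep : gfold (fun (s : String) => repB s.toList L) acc items =
        gfold (fun (s : String) => R.find? (fun L' => repB s.toList L') == some L) acc items := by
      rw [gfold_skip items _ (fun s => !pre.any (fun L' => repB s.toList L')) acc ?hsk]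
      · congr 1
        funext s
        rw [h1 s]
      case hsk =>
        intro s hs hp hq
        apply Hacc s hs
        have hpre : pre.any (fun L' => repB s.toList L') = true := by
          simpa using hq
        obtain ⟨L', hL', hpL'⟩ := List.any_eq_true.mp hpre
        exact ⟨L', hL', hpL'⟩
    rw [hstep]
    apply ih (pre ++ [L])
    · rw [hR]; simp
    · intro s hs hex
      obtain ⟨L', hL', hp⟩ := hex
      rw [← hstep]
      rcases List.mem_append.mp hL' with h | h
      · exact mem_gfold items (Hacc s hs ⟨L', h, hp⟩)
      · have hLL : L' = L := by simpa using h
        subst hLL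
        exact mem_gfold_self hp items acc hs

-- ---- B-side lemmas ----

lemma raw_eq_repB (s : String) (L : Int) (h1 : 1 ≤ L) (hn : L < (s.toList.length : Int)) :
    (PySem.Int.mod (PySem.Str.len s) L == 0 &&
      (s == String.ofList (PySem.List.pyRepeat (PySem.Str.slice s none (some L)).toList
        (PySem.Int.floordiv (PySem.Str.len s) L)))) = repB s.toList L := by
  have hslice : (PySem.Str.slice s none (some L)).toList = s.toList.take L.toNat := by
    rw [PySem.Str.toList_slice, PySem.Chars.slice_eq_listSlice, PySem.List.slice_to _ (by omega)]
  have hdiv : PySem.Int.floordiv (PySem.Str.len s) L =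
      ((s.toList.length / L.toNat : Nat) : Int) := by
    conv_lhs => rw [PySem.Str.len_eq, show L = ((L.toNat : Nat) : Int) from
      (Int.toNat_of_nonneg (by omega)).symm]
    exact PySem.Int.floordiv_natCast _ _
  have hrepeat : PySem.List.pyRepeat (s.toList.take L.toNat)
      (((s.toList.length / L.toNat : Nat)) : Int) =
      (List.replicate (s.toList.length / L.toNat) (s.toList.take L.toNat)).flatten := by
    unfold PySem.List.pyRepeat
    rw [Int.toNat_natCast]
  rw [hslice, hdiv, hrepeat]
  by_cases hx : s.toList =
      (List.replicate (s.toList.length / L.toNat) (s.toList.take L.toNat)).flatten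
  · have htl : (s.toList.take L.toNat).length = L.toNat := by rw [List.length_take]; omega
    have hlen2 : s.toList.length = (s.toList.length / L.toNat) * L.toNat := by
      conv_lhs => rw [hx]
      rw [length_flatten_replicate, htl]
    have hdvd : L ∣ ((s.toList.length : Nat) : Int) := by
      rw [show L = ((L.toNat : Nat) : Int) from (Int.toNat_of_nonneg (by omega)).symm]
      exact Int.natCast_dvd_natCast.mpr ⟨s.toList.length / L.toNat, by
        rw [Nat.mul_comm]; exact hlen2⟩
    have hmod : (PySem.Int.mod (PySem.Str.len s) L == 0) = true := by
      rw [beq_iff_eq, PySem.Int.mod_eq_zero_iff_dvd, PySem.Str.len_eq]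
      exact hdvd
    have hbeq : (s == String.ofList ((List.replicate (s.toList.length / L.toNat)
        (s.toList.take L.toNat)).flatten)) = true := by
      rw [beq_iff_eq, ← String.toList_inj, String.toList_ofList]
      exact hx
    have hrb : repB s.toList L = true := by
      simp only [repB, decide_eq_true_eq]
      exact ⟨h1, hn, hx⟩
    rw [hmod, hbeq, hrb]
    rfl
  · have hbeq : (s == String.ofList ((List.replicate (s.toList.length / L.toNat)
        (s.toList.take L.toNat)).flatten)) = false := by
      rw [beq_eq_false_iff_ne]
      intro he
      apply hx
      conv_lhs => rw [he]
      exact String.toList_ofList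
    have hrb : repB s.toList L = false := by
      simp only [repB, decide_eq_false_iff_not]
      rintro ⟨-, -, h3⟩
      exact hx h3
    rw [hbeq, hrb, Bool.and_false]

lemma minRepLen_eq_find (s : String) (cap : Int) (hc : 0 ≤ cap) :
    minRepLen s cap = (PySem.List.pyRange 1 (cap + 1)).find? (fun L => repB s.toList L) := by
  have hlen : PySem.Str.len s = (s.toList.length : Int) := PySem.Str.len_eq s
  unfold minRepLen
  by_cases hm1 : 1 ≤ min cap (PySem.Str.len s - 1) + 1
  · rw [find?_congr_mem (PySem.List.pyRange 1 (min cap (PySem.Str.len s - 1) + 1)) _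
      (fun L => repB s.toList L) ?hcg]
    case hcg =>
      intro L hLmem
      have hb := PySem.List.mem_pyRange_one.mp hLmem
      have hmn := min_le_right cap (PySem.Str.len s - 1)
      exact raw_eq_repB s L (by omega) (by rw [← hlen]; omega)
    rw [show PySem.List.pyRange 1 (cap + 1) =
        PySem.List.pyRange 1 (min cap (PySem.Str.len s - 1) + 1) ++
          PySem.List.pyRange (min cap (PySem.Str.len s - 1) + 1) (cap + 1) from
      PySem.List.pyRange_one_append _ _ _ hm1
        (by have := min_le_left cap (PySem.Str.len s - 1); omega)]
    rw [List.find?_append]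
    have hrest : (PySem.List.pyRange (min cap (PySem.Str.len s - 1) + 1) (cap + 1)).find?
        (fun L => repB s.toList L) = none := by
      rw [List.find?_eq_none]
      intro L hLmem
      have hb := PySem.List.mem_pyRange_one.mp hLmem
      simp only [repB, decide_eq_true_eq]
      rintro ⟨hL1, hL2, -⟩
      have hle : L ≤ min cap (PySem.Str.len s - 1) := le_min (by omega) (by rw [hlen]; omega)
      omega
    rw [hrest]
    cases (PySem.List.pyRange 1 (min cap (PySem.Str.len s - 1) + 1)).find?
      (fun L => repB s.toList L) <;> simp
  · rw [pyRange_nil (by omega)]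
    simp only [List.find?_nil]
    symm
    rw [List.find?_eq_none]
    intro L hLmem
    simp only [repB, decide_eq_true_eq]
    rintro ⟨hL1, hL2, -⟩
    rcases min_choice cap (PySem.Str.len s - 1) with hch | hch <;> rw [hch] at hm1
    · omega
    · rw [hlen] at hm1; omega

lemma minRepLen_bounds {s : String} {cap L : Int} (h : minRepLen s cap = some L) :
    1 ≤ L ∧ L ≤ cap := by
  unfold minRepLen at h
  have hmem := List.mem_of_find?_eq_some h
  have hb := PySem.List.mem_pyRange_one.mp hmem
  have := min_le_left cap (PySem.Str.len s - 1)
  omega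

-- bucket construction invariant
lemma buckets_inv (cap : Int) :
    ∀ (xs : List String) (bks : List (List Int)), bks.length = (cap + 1).toNat →
      (xs.foldl (fun buckets item =>
        match minRepLen item cap with
        | some L => buckets.set L.toNat (buckets.getD L.toNat [] ++ [(PySem.Int.ofStr? item).getD 0])
        | none => buckets) bks).length = (cap + 1).toNat ∧
      ∀ j, j < (cap + 1).toNat →
        (xs.foldl (fun buckets item =>
          match minRepLen item cap with
          | some L => buckets.set L.toNat (buckets.getD L.toNat [] ++ [(PySem.Int.ofStr? item).getD 0])
          | none => buckets) bks).getD j [] =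
          bks.getD j [] ++ (xs.filter (fun s => minRepLen s cap == some (j : Int))).map valOf := by
  intro xs
  induction xs with
  | nil => intro bks hlen; exact ⟨hlen, fun j hj => by simp⟩
  | cons s xs' ih =>
    intro bks hlen
    simp only [List.foldl_cons]
    cases hm : minRepLen s cap with
    | none =>
      obtain ⟨ih1, ih2⟩ := ih bks hlen
      refine ⟨ih1, ?_⟩
      intro j hj
      rw [ih2 j hj,
        List.filter_cons_of_neg (p := fun s => minRepLen s cap == some (j : Int)) (by simp [hm])]
    | some L =>
      have hb := minRepLen_bounds hm
      have hLt : L.toNat < (cap + 1).toNat := by omega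
      have hLb : L.toNat < bks.length := by omega
      obtain ⟨ih1, ih2⟩ := ih (bks.set L.toNat (bks.getD L.toNat [] ++ [(PySem.Int.ofStr? s).getD 0]))
        (by simp [hlen])
      refine ⟨ih1, ?_⟩
      intro j hj
      rw [ih2 j hj]
      by_cases hjL : j = L.toNat
      · subst hjL
        have hq : (minRepLen s cap == some ((L.toNat : Nat) : Int)) = true := by
          rw [hm, Int.toNat_of_nonneg (by omega)]
          simp
        rw [List.filter_cons_of_pos (p := fun s => minRepLen s cap == some ((L.toNat : Nat) : Int))
          (l := xs') hq]
        have hset : (bks.set L.toNat (bks.getD L.toNat [] ++ [(PySem.Int.ofStr? s).getD 0])).getD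
            L.toNat [] = bks.getD L.toNat [] ++ [(PySem.Int.ofStr? s).getD 0] := by
          rw [List.getD_eq_getElem _ _ (by simpa using hLb)]
          simp
        rw [hset]
        simp [valOf]
      · have hq : (minRepLen s cap == some ((j : Nat) : Int)) = false := by
          rw [hm]
          simp
          omega
        rw [List.filter_cons_of_neg (p := fun s => minRepLen s cap == some ((j : Nat) : Int))
          (l := xs') (by simp [hq])]
        have hset : (bks.set L.toNat (bks.getD L.toNat [] ++ [(PySem.Int.ofStr? s).getD 0])).getD
            j [] = bks.getD j [] := by
          rw [List.getD_eq_getElem _ _ (by simp; omega),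
            List.getD_eq_getElem _ _ (by omega : j < bks.length)]
          exact List.getElem_set_ne (by omega) _
        rw [hset]

-- proof-side name for B's per-length dedup step
def psi (cap : Int) (items : List String) (acc : List Int) (L : Int) : List Int :=
  gfold (fun s => minRepLen s cap == some L) acc items

lemma foldl_range_cast (M : Nat) (g : List Int → Int → List Int) (init : List Int) :
    (List.range M).foldl (fun acc j => g acc ((j : Nat) : Int)) init =
      (PySem.List.pyRange 0 ((M : Nat) : Int)).foldl g init := by
  rw [PySem.List.pyRange_zero_natCast, List.foldl_map]

-- ===== VERDICT (by name: the statement is the Claim_ definition above) =====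
theorem validate_ids_part2_spec : Claim_equal_validate_ids_part2 := by
  unfold Claim_equal_validate_ids_part2
  intro id_range _ _
  unfold Spec_validate_ids_part2
  set cap := PySem.Int.floordiv (PySem.Str.len ((PySem.List.pyGet? id_range (-1)).getD "")) 2
    with hcapdef
  have hcap : cap = ((((PySem.List.pyGet? id_range (-1)).getD "").toList.length / 2 : Nat) : Int) := by
    rw [hcapdef, PySem.Str.len_eq]
    exact_mod_cast PySem.Int.floordiv_natCast _ 2
  have hc : 0 ≤ cap := by rw [hcap]; positivity
  -- A in canonical gated form
  have hA : validate_ids_part2 id_range =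
      (PySem.List.pyRange 1 (cap + 1)).foldl
        (fun acc L => gfold (fun (s : String) => repB s.toList L) acc id_range) [] := by
    simp only [validate_ids_part2]
    apply PySem.List.foldl_congr_mem
    intro acc L hL
    have h1 : (1 : Int) ≤ L := (PySem.List.mem_pyRange_one.mp hL).1
    unfold gfold
    apply PySem.List.foldl_congr_mem
    intro acc' s _
    exact body_eq L h1 acc' s
  -- B in canonical gated form
  have hbuckets : (id_range.foldl (fun buckets item =>
        match minRepLen item cap with
        | some L => buckets.set L.toNat (buckets.getD L.toNat [] ++ [(PySem.Int.ofStr? item).getD 0])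
        | none => buckets) (List.replicate (cap + 1).toNat ([] : List Int))) =
      (List.range (cap + 1).toNat).map
        (fun (j : Nat) =>
          (id_range.filter (fun s => minRepLen s cap == some ((j : Nat) : Int))).map valOf) := by
    obtain ⟨h1, h2⟩ := buckets_inv cap id_range (List.replicate (cap + 1).toNat []) (by simp)
    apply List.ext_getElem (by rw [h1, List.length_map, List.length_range])
    intro j hj1 hj2
    have hjlt : j < (cap + 1).toNat := by rwa [h1] at hj1
    have hh := h2 j hjlt
    rw [List.getD_eq_getElem _ _ hj1] at hh
    rw [List.getD_eq_getElem _ _ (by simpa using hjlt)] at hh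
    simp only [List.getElem_replicate, List.nil_append] at hh
    rw [hh]
    simp
  have hB : validate_ids_part2_alt id_range =
      (PySem.List.pyRange 1 (cap + 1)).foldl (psi cap id_range) [] := by
    simp only [validate_ids_part2_alt]
    rw [hbuckets, List.foldl_map]
    have hinner : ∀ (q : String → Bool) (out : List Int),
        ((id_range.filter q).map valOf).foldl
          (fun out v => if v ∉ out then out ++ [v] else out) out = gfold q out id_range := by
      intro q out
      rw [List.foldl_map]
      unfold gfold
      rw [show (fun (x : List Int) (y : String) =>
            if valOf y ∉ x then x ++ [valOf y] else x) =
          (fun (a : List Int) (s : String) => dadd a (valOf s)) from rfl]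
      rw [← PySem.List.foldl_if_eq_foldl_filter q (fun a s => dadd a (valOf s))]
    have hcg : (List.range (cap + 1).toNat).foldl
        (fun acc (j : Nat) =>
          ((id_range.filter (fun s => minRepLen s cap == some ((j : Nat) : Int))).map valOf).foldl
            (fun out v => if v ∉ out then out ++ [v] else out) acc) [] =
        (List.range (cap + 1).toNat).foldl
          (fun acc (j : Nat) => psi cap id_range acc ((j : Nat) : Int)) [] := by
      apply PySem.List.foldl_congr_mem
      intro acc j _
      exact hinner _ acc
    rw [hcg, foldl_range_cast (cap + 1).toNat (psi cap id_range) []]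
    rw [show (((cap + 1).toNat : Nat) : Int) = cap + 1 from Int.toNat_of_nonneg (by omega)]
    rw [PySem.List.pyRange_one_cons (by omega : (0 : Int) < cap + 1), List.foldl_cons]
    have h0 : psi cap id_range [] 0 = [] := by
      apply gfold_false
      intro s _
      cases hm : minRepLen s cap with
      | none => simp
      | some L =>
        have := minRepLen_bounds hm
        simp
        omega
    rw [h0, show (0 : Int) + 1 = 1 from by norm_num]
  -- chain
  rw [hA, hB]
  have hmain := main_reorder id_range (PySem.List.pyRange 1 (cap + 1)) (pyRange_nodup _ _)
    (PySem.List.pyRange 1 (cap + 1)) [] [] (by simp)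
    (by intro s _ hex; obtain ⟨L, hL, -⟩ := hex; cases hL)
  rw [hmain]
  have hmrl : ∀ s : String, (PySem.List.pyRange 1 (cap + 1)).find? (fun L' => repB s.toList L') =
      minRepLen s cap := fun s => (minRepLen_eq_find s cap hc).symm
  simp only [hmrl]
  rfl
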